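-- pv_equiv track=rewrite | github.com/VaneLord67/seedcup2022 | client/model.py | add_score_to_dir
-- ===== SOURCE A (Python) =====
-- def add_score_to_dir(score,tool,pos,a):
--     for i in tool:
--         dx = i[0]-pos[0]
--         dy = i[1]-pos[1]
--         dir = []
--         if dx<0 and dy>0:
--             #dir = [(-1,1),(-1,0),(0,-1),(1,-1),(1,0),(0,1)]
--             dir.append(0)
--         if dx<0 and dy<0:
--             dir.append(1)
--             dir.append(2)
--         if dx>0 and dy<0:
--             dir.append(3)
--         if dx>0 and dy>0:
--             dir.append(4)
--             dir.append(5)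
--         if dx < 0 and dy==0:
--             dir.append(1)
--         if dx == 0 and dy<0:
--             dir.append(2)
--         if dx > 0 and dy==0:
--             dir.append(4)
--         if dx > 0 and dy==0:
--             dir.append(5)
--         for d in dir:
--             score[d] += (13 - i[2])*a#距离越远分数越低
--     return score
-- ===== SOURCE B (Python) =====
-- def add_score_to_dir(score, tool, pos, a):
--     # Bucket-major: for each of the six direction buckets, one coalesced sign
--     # predicate selects the matching tools; sum their (13 - w) weights and do a
--     # single multiply-add into that bucket (skipped when nothing matched).
--     px, py = pos[0], pos[1]
--     preds = (
--         lambda dx, dy: dx < 0 < dy,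
--         lambda dx, dy: dx < 0 and dy <= 0,
--         lambda dx, dy: dx <= 0 and dy < 0,
--         lambda dx, dy: dy < 0 < dx,
--         lambda dx, dy: dx > 0 and dy >= 0,
--         lambda dx, dy: dx > 0 and dy >= 0,
--     )
--     for d, ok in enumerate(preds):
--         hits = [13 - w for x, y, w in tool if ok(x - px, y - py)]
--         if hits:
--             score[d] += sum(hits) * a
--     return score
-- ===== Notes on version B (the rewrite author's own statement) =====
-- stated objective: alternative
-- what changed: B is bucket-major: it makes one pass per direction bucket with a single coalesced sign predicate, sums (13-w) over the matching tools and applies one multiply-add per bucket, instead of A's tool-major loop with an eight-branch condition chain and per-tool increments.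
import Mathlib
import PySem

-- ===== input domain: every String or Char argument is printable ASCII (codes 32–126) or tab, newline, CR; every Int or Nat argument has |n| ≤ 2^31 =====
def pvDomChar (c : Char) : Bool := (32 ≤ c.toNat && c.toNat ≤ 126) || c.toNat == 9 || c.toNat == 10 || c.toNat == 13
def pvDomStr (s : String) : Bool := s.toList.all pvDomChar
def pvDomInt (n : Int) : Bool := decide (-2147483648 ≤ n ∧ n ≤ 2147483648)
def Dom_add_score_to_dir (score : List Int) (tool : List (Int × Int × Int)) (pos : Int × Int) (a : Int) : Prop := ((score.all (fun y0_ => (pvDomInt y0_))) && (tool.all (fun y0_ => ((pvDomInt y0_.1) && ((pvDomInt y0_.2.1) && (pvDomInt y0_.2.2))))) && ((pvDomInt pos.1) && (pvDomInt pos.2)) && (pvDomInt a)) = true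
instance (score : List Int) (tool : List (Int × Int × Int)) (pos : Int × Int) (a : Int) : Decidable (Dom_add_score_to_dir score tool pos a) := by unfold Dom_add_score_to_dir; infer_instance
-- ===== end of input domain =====

-- B is bucket-major (one pass per direction bucket, one multiply-add each) where A is tool-major
-- (eight branches and per-tool increments); both mutate `score` in place in Python, the
-- equivalence proved here is about the returned value.

-- ===== PORT A =====
-- score[d] += x; under Pre_ every accessed d is in range (Python raises out of range)
def pvBump (s : List Int) (d : Nat) (x : Int) : List Int := s.set d (s.getD d 0 + x)

def add_score_to_dir (score : List Int) (tool : List (Int × Int × Int)) (pos : Int × Int) (a : Int) : List Int :=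
  tool.foldl (fun s i =>
    let dx := i.1 - pos.1
    let dy := i.2.1 - pos.2
    let dir : List Nat :=
      (if dx < 0 ∧ dy > 0 then [0] else []) ++
      (if dx < 0 ∧ dy < 0 then [1, 2] else []) ++
      (if dx > 0 ∧ dy < 0 then [3] else []) ++
      (if dx > 0 ∧ dy > 0 then [4, 5] else []) ++
      (if dx < 0 ∧ dy = 0 then [1] else []) ++
      (if dx = 0 ∧ dy < 0 then [2] else []) ++
      (if dx > 0 ∧ dy = 0 then [4] else []) ++
      (if dx > 0 ∧ dy = 0 then [5] else [])
    dir.foldl (fun s d => pvBump s d ((13 - i.2.2) * a)) s) score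

-- ===== PORT B =====
-- Source B's tuple of six coalesced sign predicates, one per bucket
def pvPreds : List (Int → Int → Bool) :=
  [fun dx dy => decide (dx < 0) && decide (0 < dy),
   fun dx dy => decide (dx < 0) && decide (dy ≤ 0),
   fun dx dy => decide (dx ≤ 0) && decide (dy < 0),
   fun dx dy => decide (dy < 0) && decide (0 < dx),
   fun dx dy => decide (0 < dx) && decide (0 ≤ dy),
   fun dx dy => decide (0 < dx) && decide (0 ≤ dy)]

-- enumerate yields d ∈ {0,…,5}, so .toNat on the index is exact
def add_score_to_dir_alt (score : List Int) (tool : List (Int × Int × Int)) (pos : Int × Int) (a : Int) : List Int :=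
  (PySem.List.enumerate pvPreds).foldl (fun s p =>
    let hits := (tool.filter (fun i => p.2 (i.1 - pos.1) (i.2.1 - pos.2))).map (fun i => 13 - i.2.2)
    if hits = [] then s else s.set p.1.toNat (s.getD p.1.toNat 0 + hits.sum * a)) score

-- ===== PRECONDITION & SPEC =====
-- the largest score index a tool element makes Python access, if any
def pvNeed (sx sy : Int) : Option Nat :=
  if sx < 0 ∧ sy > 0 then some 0
  else if sx < 0 ∧ sy < 0 then some 2
  else if sx > 0 ∧ sy < 0 then some 3
  else if sx > 0 ∧ sy > 0 then some 5
  else if sx < 0 ∧ sy = 0 then some 1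
  else if sx = 0 ∧ sy < 0 then some 2
  else if sx > 0 ∧ sy = 0 then some 5
  else none

-- Pre_ excludes exactly the inputs on which Python A raises IndexError (a bucket index ≥
-- len(score)); Python B raises on the same inputs (a bucket is touched iff some tool hits it).
def Pre_add_score_to_dir (score : List Int) (tool : List (Int × Int × Int)) (pos : Int × Int) (a : Int) : Prop :=
  ∀ i ∈ tool, ∀ k, pvNeed (i.1 - pos.1) (i.2.1 - pos.2) = some k → k < score.length

instance (score : List Int) (tool : List (Int × Int × Int)) (pos : Int × Int) (a : Int) : Decidable (Pre_add_score_to_dir score tool pos a) := by unfold Pre_add_score_to_dir; infer_instance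

def pvWitness_add_score_to_dir : List Int × (List (Int × Int × Int)) × (Int × Int) × Int :=
  ([0, 0, 0, 0, 0, 0], [(2, 3, 4), (0, 0, 1)], (1, 1), 2)

def Spec_add_score_to_dir (score : List Int) (tool : List (Int × Int × Int)) (pos : Int × Int) (a : Int) (out : List Int) : Prop := out = add_score_to_dir_alt score tool pos a
instance (score : List Int) (tool : List (Int × Int × Int)) (pos : Int × Int) (a : Int) (out : List Int) : Decidable (Spec_add_score_to_dir score tool pos a out) := by unfold Spec_add_score_to_dir; infer_instance

-- ===== CLAIM (what is proved, stated in full; the proofs are below) =====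
def Claim_equal_add_score_to_dir : Prop := ∀ (score : List Int) (tool : List (Int × Int × Int)) (pos : Int × Int) (a : Int), Dom_add_score_to_dir score tool pos a → Pre_add_score_to_dir score tool pos a → Spec_add_score_to_dir score tool pos a (add_score_to_dir score tool pos a)

-- ===== LEMMAS AND PROOFS =====

-- A's bucket list for one tool
def pvDirList (dx dy : Int) : List Nat :=
  (if dx < 0 ∧ dy > 0 then [0] else []) ++
  (if dx < 0 ∧ dy < 0 then [1, 2] else []) ++
  (if dx > 0 ∧ dy < 0 then [3] else []) ++
  (if dx > 0 ∧ dy > 0 then [4, 5] else []) ++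
  (if dx < 0 ∧ dy = 0 then [1] else []) ++
  (if dx = 0 ∧ dy < 0 then [2] else []) ++
  (if dx > 0 ∧ dy = 0 then [4] else []) ++
  (if dx > 0 ∧ dy = 0 then [5] else [])

-- per-index total added by A over the whole tool list
def pvContribA (tool : List (Int × Int × Int)) (pos : Int × Int) (a : Int) (j : Nat) : Int :=
  (tool.map (fun i => ((pvDirList (i.1 - pos.1) (i.2.1 - pos.2)).count j : Int) * ((13 - i.2.2) * a))).sum

theorem getElem?_pvBump (s : List Int) (d : Nat) (x : Int) (j : Nat) :
    (pvBump s d x)[j]? = if j = d then s[j]?.map (· + x) else s[j]? := by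
  unfold pvBump
  by_cases h : j = d
  · subst h
    by_cases hl : j < s.length
    · simp [List.getElem?_set, hl, List.getD, List.getElem?_eq_getElem hl]
    · have hn : s[j]? = none := List.getElem?_eq_none_iff.mpr (by omega)
      have hset : s.set j (s.getD j 0 + x) = s := List.set_eq_of_length_le (by omega)
      rw [hset, if_pos rfl, hn]
      rfl
  · simp [List.getElem?_set, h, Ne.symm h]

theorem inner_foldl_getElem? (dir : List Nat) (x : Int) (s : List Int) (j : Nat) :
    (dir.foldl (fun s d => pvBump s d x) s)[j]? = s[j]?.map (· + (dir.count j : Int) * x) := by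
  induction dir generalizing s with
  | nil => cases h : s[j]? <;> simp [h]
  | cons d ds ih =>
      simp only [List.foldl_cons, ih, getElem?_pvBump, List.count_cons]
      by_cases h : j = d
      · subst h
        cases hs : s[j]? <;> simp [hs] <;> ring
      · have h2 : ¬ d = j := fun hh => h hh.symm
        cases hs : s[j]? <;> simp [hs, h, h2]

theorem portA_getElem? (tool : List (Int × Int × Int)) (pos : Int × Int) (a : Int)
    (s : List Int) (j : Nat) :
    (add_score_to_dir s tool pos a)[j]? = s[j]?.map (· + pvContribA tool pos a j) := by
  induction tool generalizing s with
  | nil => unfold add_score_to_dir pvContribA; cases h : s[j]? <;> simp [h]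
  | cons i t ih =>
      have step : add_score_to_dir s (i :: t) pos a =
          add_score_to_dir ((pvDirList (i.1 - pos.1) (i.2.1 - pos.2)).foldl
            (fun s d => pvBump s d ((13 - i.2.2) * a)) s) t pos a := by
        unfold add_score_to_dir pvDirList; rfl
      rw [step, ih, inner_foldl_getElem?]
      unfold pvContribA
      cases hs : s[j]? <;> simp [hs, List.map_cons, List.sum_cons] <;> ring

-- bucket membership with multiplicity: index j occurs in A's bucket list exactly once
-- when B's j-th coalesced predicate holds, never otherwise (and never for j ≥ 6)
theorem count_pvDirList (dx dy : Int) (j : Nat) :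
    ((pvDirList dx dy).count j : Int) =
      if (pvPreds.getD j (fun _ _ => false)) dx dy then 1 else 0 := by
  match j with
  | 0 | 1 | 2 | 3 | 4 | 5 | _ + 6 =>
    simp only [pvPreds, List.getD_cons_zero, List.getD_cons_succ, List.getD_nil]
    rcases lt_trichotomy dx 0 with hx | hx | hx <;>
      rcases lt_trichotomy dy 0 with hy | hy | hy <;>
        simp only [pvDirList] <;>
        (repeat first
          | rw [if_pos (by omega)]
          | rw [if_neg (by omega)]) <;>
        simp only [List.nil_append, List.append_nil, List.count_cons, List.count_nil,
          List.count_append, Bool.and_eq_true, decide_eq_true_eq] <;>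
        split_ifs <;> simp_all <;> omega

-- pull `* a` out of a filtered-map sum
theorem sum_filter_map_mul (l : List (Int × Int × Int)) (p : (Int × Int × Int) → Bool)
    (f : (Int × Int × Int) → Int) (a : Int) :
    (l.map (fun i => (if p i then (1:Int) else 0) * (f i * a))).sum =
      ((l.filter p).map f).sum * a := by
  induction l with
  | nil => simp
  | cons i t ih =>
      by_cases h : p i = true
      · simp only [List.map_cons, List.sum_cons, List.filter_cons_of_pos h, if_pos h, ih]
        ring
      · simp only [List.map_cons, List.sum_cons, List.filter_cons_of_neg h, if_neg h, ih]
        ring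

-- one bucket step of B, seen through getElem?
theorem stepB_getElem? (s : List Int) (dn : Nat) (hits : List Int) (a : Int) (j : Nat) :
    (if hits = [] then s else s.set dn (s.getD dn 0 + hits.sum * a))[j]? =
      s[j]?.map (· + if j = dn then hits.sum * a else 0) := by
  by_cases he : hits = []
  · subst he
    rw [if_pos rfl]
    cases hs : s[j]? <;> by_cases h : j = dn <;> simp [hs, h]
  · rw [if_neg he]
    have : s.set dn (s.getD dn 0 + hits.sum * a) = pvBump s dn (hits.sum * a) := rfl
    rw [this, getElem?_pvBump]
    by_cases h : j = dn
    · simp [h]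
    · cases hs : s[j]? <;> simp [hs, h]

theorem portB_getElem? (tool : List (Int × Int × Int)) (pos : Int × Int) (a : Int)
    (s : List Int) (j : Nat) :
    (add_score_to_dir_alt s tool pos a)[j]? = s[j]?.map (· + pvContribA tool pos a j) := by
  have hc : pvContribA tool pos a j =
      (tool.map (fun i => (if (pvPreds.getD j (fun _ _ => false)) (i.1 - pos.1) (i.2.1 - pos.2)
        then (1:Int) else 0) * ((13 - i.2.2) * a))).sum := by
    unfold pvContribA
    simp only [count_pvDirList]
  rw [hc]
  unfold add_score_to_dir_alt
  have he : PySem.List.enumerate pvPreds =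
      [((0:Int), fun dx dy => decide (dx < 0) && decide (0 < dy)),
       (1, fun dx dy => decide (dx < 0) && decide (dy ≤ 0)),
       (2, fun dx dy => decide (dx ≤ 0) && decide (dy < 0)),
       (3, fun dx dy => decide (dy < 0) && decide (0 < dx)),
       (4, fun dx dy => decide (0 < dx) && decide (0 ≤ dy)),
       (5, fun dx dy => decide (0 < dx) && decide (0 ≤ dy))] := rfl
  rw [he]
  simp only [List.foldl_cons, List.foldl_nil, show ((0:Int).toNat = 0) from rfl,
    show ((1:Int).toNat = 1) from rfl, show ((2:Int).toNat = 2) from rfl,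
    show ((3:Int).toNat = 3) from rfl, show ((4:Int).toNat = 4) from rfl,
    show ((5:Int).toNat = 5) from rfl]
  rw [stepB_getElem?, stepB_getElem?, stepB_getElem?, stepB_getElem?, stepB_getElem?,
    stepB_getElem?]
  cases hs : s[j]? with
  | none => simp [hs]
  | some v =>
      simp only [hs, Option.map_some]
      rcases j with _ | _ | _ | _ | _ | _ | n
      · simp only [pvPreds, List.getD_cons_zero, List.getD_cons_succ, List.getD_nil]
        rw [sum_filter_map_mul]; norm_num
      · simp only [pvPreds, List.getD_cons_zero, List.getD_cons_succ, List.getD_nil]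
        rw [sum_filter_map_mul]; norm_num
      · simp only [pvPreds, List.getD_cons_zero, List.getD_cons_succ, List.getD_nil]
        rw [sum_filter_map_mul]; norm_num
      · simp only [pvPreds, List.getD_cons_zero, List.getD_cons_succ, List.getD_nil]
        rw [sum_filter_map_mul]; norm_num
      · simp only [pvPreds, List.getD_cons_zero, List.getD_cons_succ, List.getD_nil]
        rw [sum_filter_map_mul]; norm_num
      · simp only [pvPreds, List.getD_cons_zero, List.getD_cons_succ, List.getD_nil]
        rw [sum_filter_map_mul]; norm_num
      · simp only [pvPreds, List.getD_cons_zero, List.getD_cons_succ, List.getD_nil]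
        simp

theorem ports_agree (score : List Int) (tool : List (Int × Int × Int)) (pos : Int × Int) (a : Int) :
    add_score_to_dir score tool pos a = add_score_to_dir_alt score tool pos a := by
  apply List.ext_getElem?
  intro j
  rw [portA_getElem?, portB_getElem?]

-- ===== VERDICT (by name: the statement is the Claim_ definition above) =====
theorem add_score_to_dir_spec : Claim_equal_add_score_to_dir := by
  intro score tool pos a _ _
  unfold Spec_add_score_to_dir
  exact ports_agree score tool pos a
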